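-- pv_equiv track=rewrite | github.com/beejak/mcp-sentinel | mcp-sentinel-python/src/mcp_sentinel/detectors/prompt_injection.py | _block_comment_spans_line
-- ===== SOURCE A (Python) =====
-- def _block_comment_spans_line(line: str) -> list[tuple[int, int]]:
--     """Return ``(start, end)`` spans for ``/* ... */`` on a single line."""
--     spans: list[tuple[int, int]] = []
--     i = 0
--     while i < len(line):
--         if i + 1 < len(line) and line[i : i + 2] == "/*":
--             close = line.find("*/", i + 2)
--             if close == -1:
--                 spans.append((i, len(line)))
--                 break
--             spans.append((i, close + 2))
--             i = close + 2
--             continue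
--         i += 1
--     return spans
-- ===== SOURCE B (Python) =====
-- def _block_comment_spans_line(line: str) -> list[tuple[int, int]]:
--     """Return ``(start, end)`` spans for ``/* ... */`` on a single line."""
--     spans: list[tuple[int, int]] = []
--     start = 0
--     while True:
--         i = line.find("/*", start)
--         if i == -1:
--             return spans
--         close = line.find("*/", i + 2)
--         if close == -1:
--             spans.append((i, len(line)))
--             return spans
--         spans.append((i, close + 2))
--         start = close + 2
-- ===== Notes on version B (the rewrite author's own statement) =====
-- stated objective: faster
-- what changed: Replaces the per-character while-scan with a loop that jumps directly from one comment opener to the next via str.find with a start offset, so positions without an opener are never visited one by one.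
import Mathlib
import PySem

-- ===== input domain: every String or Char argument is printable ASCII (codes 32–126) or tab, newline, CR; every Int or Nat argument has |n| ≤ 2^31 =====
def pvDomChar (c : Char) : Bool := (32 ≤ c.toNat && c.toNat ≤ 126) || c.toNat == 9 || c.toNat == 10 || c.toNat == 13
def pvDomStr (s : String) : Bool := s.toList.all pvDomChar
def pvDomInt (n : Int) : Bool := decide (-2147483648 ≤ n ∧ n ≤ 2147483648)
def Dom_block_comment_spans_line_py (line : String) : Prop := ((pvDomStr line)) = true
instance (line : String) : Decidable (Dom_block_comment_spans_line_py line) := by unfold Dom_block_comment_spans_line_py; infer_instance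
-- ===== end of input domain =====

-- B replaces A's per-character scan with a loop that jumps from one comment opener to the next via str.find with a start offset (measured faster; same return value).

-- ===== PORT A =====
-- A's while loop: advance i by 1, or jump past a found "*/"; the fuel argument is the loop bound
-- (i grows by at least 1 per iteration, so cs.length iterations always suffice).
def pvALoop (cs : List Char) (spans : List (Int × Int)) (i : Nat) : Nat → List (Int × Int)
  | 0 => spans
  | fuel + 1 =>
    if i < cs.length then
      if i + 1 < cs.length ∧ PySem.Chars.slice cs (some ((i : Nat) : Int)) (some (((i + 2 : Nat)) : Int)) = ['/', '*'] then
        let close := PySem.Chars.findFrom cs ['*', '/'] (((i + 2 : Nat)) : Int) none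
        if close = -1 then spans ++ [(((i : Nat) : Int), (cs.length : Int))]
        else pvALoop cs (spans ++ [(((i : Nat) : Int), close + 2)]) (close.toNat + 2) fuel
      else pvALoop cs spans (i + 1) fuel
    else spans

def block_comment_spans_line_py (line : String) : List (Int × Int) :=
  pvALoop line.toList [] 0 line.toList.length

-- ===== PORT B =====
-- B's while loop over `start`: jump to the next "/*" with find; the fuel argument is the loop bound
-- (start grows by at least 2 per iteration, so cs.length + 1 iterations always suffice).
def pvBGo (cs : List Char) (pos : Nat) (acc : List (Int × Int)) : Nat → List (Int × Int)
  | 0 => acc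
  | fuel + 1 =>
    let i := PySem.Chars.findFrom cs ['/', '*'] ((pos : Nat) : Int) none
    if i = -1 then acc
    else
      let close := PySem.Chars.findFrom cs ['*', '/'] ((i.toNat + 2 : Nat) : Int) none
      if close = -1 then acc ++ [(i, (cs.length : Int))]
      else pvBGo cs (close.toNat + 2) (acc ++ [(i, close + 2)]) fuel

def block_comment_spans_line_py_alt (line : String) : List (Int × Int) :=
  pvBGo line.toList 0 [] (line.toList.length + 1)

-- ===== PRECONDITION & SPEC =====
def Spec_block_comment_spans_line_py (line : String) (out : List (Int × Int)) : Prop := out = block_comment_spans_line_py_alt line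
instance (line : String) (out : List (Int × Int)) : Decidable (Spec_block_comment_spans_line_py line out) := by unfold Spec_block_comment_spans_line_py; infer_instance

-- ===== CLAIM (what is proved, stated in full; the proofs are below) =====
def Claim_equal_block_comment_spans_line_py : Prop := ∀ (line : String), Dom_block_comment_spans_line_py line → Spec_block_comment_spans_line_py line (block_comment_spans_line_py line)

-- ===== LEMMAS AND PROOFS =====

-- no "/*" starting at i (i < len): find from i equals find from i+1
theorem pv_findFrom_step (cs : List Char) (sub : List Char) (i : Nat) (hi : i < cs.length)
    (hnp : ¬ sub <+: cs.drop i) :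
    PySem.Chars.findFrom cs sub ((i : Nat) : Int) none = PySem.Chars.findFrom cs sub ((i + 1 : Nat) : Int) none := by
  have hk : i ≤ cs.length := le_of_lt hi
  have hk1 : i + 1 ≤ cs.length := hi
  have hdrop : cs.drop (i + 1) = (cs.drop i).drop 1 := by
    rw [List.drop_drop]
  by_cases h : PySem.Chars.findFrom cs sub ((i : Nat) : Int) none = -1
  · rw [h]
    rw [PySem.Chars.findFrom_natCast_eq_neg_one_iff cs sub i hk] at h
    rw [eq_comm, PySem.Chars.findFrom_natCast_eq_neg_one_iff cs sub (i + 1) hk1]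
    intro hinf
    exact h (hinf.trans (hdrop ▸ (List.drop_suffix 1 (cs.drop i)).isInfix))
  · obtain ⟨hle, hpre, hmin⟩ := PySem.Chars.findFrom_natCast_spec cs sub i hk h
    set r := PySem.Chars.findFrom cs sub ((i : Nat) : Int) none with hr
    have hr0 : 0 ≤ r := le_trans (by exact_mod_cast Int.natCast_nonneg i) hle
    have hrne : r.toNat ≠ i := by
      intro he
      exact hnp (he ▸ hpre)
    have hri : i + 1 ≤ r.toNat := by omega
    have h' : PySem.Chars.findFrom cs sub ((i + 1 : Nat) : Int) none ≠ -1 := by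
      rw [Ne, PySem.Chars.findFrom_natCast_eq_neg_one_iff cs sub (i + 1) hk1, not_not]
      have : cs.drop r.toNat = (cs.drop (i + 1)).drop (r.toNat - (i + 1)) := by
        rw [List.drop_drop]
        congr 1
        omega
      exact (this ▸ hpre).isInfix.trans (List.drop_suffix _ _).isInfix
    obtain ⟨hle', hpre', hmin'⟩ := PySem.Chars.findFrom_natCast_spec cs sub (i + 1) hk1 h'
    set r' := PySem.Chars.findFrom cs sub ((i + 1 : Nat) : Int) none with hr'
    have hr'0 : 0 ≤ r' := le_trans (by exact_mod_cast Int.natCast_nonneg (i + 1)) hle'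
    rcases lt_trichotomy r.toNat r'.toNat with hlt | heq | hgt
    · exact absurd hpre (hmin' r.toNat (by omega) hlt)
    · omega
    · exact absurd hpre' (hmin r'.toNat (by omega) hgt)

-- find from the end of the string finds nothing
theorem pv_findFrom_len (cs : List Char) :
    PySem.Chars.findFrom cs ['/', '*'] ((cs.length : Nat) : Int) none = -1 := by
  rw [PySem.Chars.findFrom_natCast_eq_neg_one_iff cs ['/', '*'] cs.length le_rfl]
  simp

-- if "/*" starts exactly at i, find from i returns i
theorem pv_findFrom_here (cs : List Char) (i : Nat) (hk : i ≤ cs.length)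
    (hp : ['/', '*'] <+: cs.drop i) :
    PySem.Chars.findFrom cs ['/', '*'] ((i : Nat) : Int) none = ((i : Nat) : Int) := by
  rw [PySem.Chars.findFrom_natCast cs ['/', '*'] i hk]
  have hne : PySem.Chars.find (cs.drop i) ['/', '*'] ≠ -1 := by
    rw [Ne, PySem.Chars.find_eq_neg_one_iff, not_not]
    exact hp.isInfix
  have hnn : 0 ≤ PySem.Chars.find (cs.drop i) ['/', '*'] := by
    rw [PySem.Chars.find_nonneg_iff]
    exact hp.isInfix
  obtain ⟨_, hmin⟩ := PySem.Chars.find_spec hnn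
  have hz : (PySem.Chars.find (cs.drop i) ['/', '*']).toNat = 0 := by
    by_contra hc
    exact hmin 0 (by omega) (by simpa using hp)
  have : PySem.Chars.find (cs.drop i) ['/', '*'] = 0 := by omega
  simp [this]

-- pvBGo depends on pos only through findFrom
theorem pvBGo_congr (cs : List Char) (p q : Nat) (acc : List (Int × Int)) (fuel : Nat)
    (hfe : PySem.Chars.findFrom cs ['/', '*'] ((p : Nat) : Int) none = PySem.Chars.findFrom cs ['/', '*'] ((q : Nat) : Int) none) :
    pvBGo cs p acc fuel = pvBGo cs q acc fuel := by
  cases fuel with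
  | zero => rfl
  | succ fuel => rw [pvBGo, pvBGo]; simp only [hfe]

-- A returns its accumulator once i reaches the end, whatever the fuel
theorem pvALoop_len (cs : List Char) (spans : List (Int × Int)) (fuel : Nat) :
    pvALoop cs spans cs.length fuel = spans := by
  cases fuel with
  | zero => rfl
  | succ fuel => rw [pvALoop]; simp

-- B returns its accumulator once pos reaches the end, whatever the fuel
theorem pvBGo_len (cs : List Char) (acc : List (Int × Int)) (fuel : Nat) :
    pvBGo cs cs.length acc fuel = acc := by
  cases fuel with
  | zero => rfl
  | succ fuel => rw [pvBGo]; simp [pv_findFrom_len]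

-- the slice test of A is the prefix test
theorem pv_slice_iff (cs : List Char) (i : Nat) (hi : i < cs.length) :
    (i + 1 < cs.length ∧ PySem.Chars.slice cs (some ((i : Nat) : Int)) (some (((i + 2 : Nat)) : Int)) = ['/', '*'])
      ↔ ['/', '*'] <+: cs.drop i := by
  have hs : PySem.Chars.slice cs (some ((i : Nat) : Int)) (some (((i + 2 : Nat)) : Int)) = (cs.drop i).take 2 := by
    rw [PySem.Chars.slice_eq_listSlice, PySem.List.slice_natCast]
    norm_num
  constructor
  · rintro ⟨-, h⟩
    rw [hs] at h
    exact h ▸ List.take_prefix 2 (cs.drop i)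
  · intro hp
    have hlen : 2 ≤ (cs.drop i).length := hp.length_le
    rw [List.length_drop] at hlen
    refine ⟨by omega, ?_⟩
    rw [hs]
    simpa using (List.prefix_iff_eq_take.mp hp).symm

-- A's scan from i equals B's jump loop from i, for every i ≤ len and sufficient fuel
theorem pv_main (cs : List Char) : ∀ n i, i ≤ cs.length → cs.length - i ≤ n →
    ∀ (spans : List (Int × Int)) (fa fb : Nat), cs.length - i ≤ fa → cs.length - i < 2 * fb →
    pvALoop cs spans i fa = pvBGo cs i spans fb := by
  intro n
  induction n with
  | zero =>
    intro i h hn spans fa fb _ _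
    have hi : i = cs.length := by omega
    subst hi
    rw [pvALoop_len, pvBGo_len]
  | succ n ih =>
    intro i h hn spans fa fb hfa hfb
    by_cases hil : i < cs.length
    · obtain ⟨fa, rfl⟩ : ∃ fa', fa = fa' + 1 := ⟨fa - 1, by omega⟩
      obtain ⟨fb, rfl⟩ : ∃ fb', fb = fb' + 1 := ⟨fb - 1, by omega⟩
      by_cases hp : ['/', '*'] <+: cs.drop i
      · -- a comment opens at i: both take the found branch
        have hfi := pv_findFrom_here cs i h hp
        rw [pvALoop, pvBGo]
        simp only [hil, if_true, (pv_slice_iff cs i hil).mpr hp, hfi, true_and,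
          Int.toNat_natCast]
        have hcast : (((i + 2 : Nat)) : Int) = ((i : Int) + 2) := by push_cast; ring
        simp only [hcast]
        by_cases hc : PySem.Chars.findFrom cs ['*', '/'] ((i : Int) + 2) none = -1
        · simp [hc]
        · rw [if_neg hc, if_neg hc]
          have hk2 : i + 2 ≤ cs.length := by
            have h2 := hp.length_le
            rw [List.length_drop] at h2
            simp at h2
            omega
          obtain ⟨hge, hpre2, -⟩ := PySem.Chars.findFrom_natCast_spec cs ['*', '/'] (i + 2) hk2
            (by rw [hcast]; exact hc)
          rw [hcast] at hge hpre2
          have hlen2 : (PySem.Chars.findFrom cs ['*', '/'] ((i : Int) + 2) none).toNat + 2 ≤ cs.length := by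
            have h2 := hpre2.length_le
            rw [List.length_drop] at h2
            simp at h2
            omega
          exact ih _ hlen2 (by omega) _ fa fb (by omega) (by omega)
      · -- no opener at i: A steps to i+1, B's find skips i too
        have hcond : ¬ (i + 1 < cs.length ∧ PySem.Chars.slice cs (some ((i : Nat) : Int)) (some (((i + 2 : Nat)) : Int)) = ['/', '*']) := by
          rw [pv_slice_iff cs i hil]
          exact hp
        rw [pvALoop]
        simp only [hil, if_true, hcond, if_false]
        rw [ih (i + 1) hil (by omega) spans fa (fb + 1) (by omega) (by omega)]
        exact (pvBGo_congr cs i (i + 1) spans (fb + 1) (pv_findFrom_step cs ['/', '*'] i hil hp)).symm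
    · have hi : i = cs.length := by omega
      subst hi
      rw [pvALoop_len, pvBGo_len]

-- ===== VERDICT (by name: the statement is the Claim_ definition above) =====
theorem block_comment_spans_line_py_spec : Claim_equal_block_comment_spans_line_py := by
  intro line _
  unfold Spec_block_comment_spans_line_py block_comment_spans_line_py block_comment_spans_line_py_alt
  exact pv_main line.toList line.toList.length 0 (Nat.zero_le _) (by omega) [] _ _ (by omega) (by omega)
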